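-- pv_equiv track=rewrite | github.com/TheTomcat/AdventOfCode | year_2020/day_17_2020.py | iterate_over
-- ===== SOURCE A (Python) =====
-- def is_four_d(cubes):
--     return 'w' in cubes
--
-- def iterate_over(cubes, z=None):
--     for x in range(cubes['x'][0]-1,cubes['x'][1]+2):
--         for y in range(cubes['y'][0]-1,cubes['y'][1]+2):
--             for z in range(cubes['z'][0]-1,cubes['z'][1]+2):
--                 if is_four_d(cubes):
--                     for w in range(cubes['w'][0]-1, cubes['w'][1]+2):
--                         yield (x,y,z,w)
--                 else:
--                     yield (x,y,z)
-- ===== SOURCE B (Python) =====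
-- def iterate_over(cubes, z=None):
--     axes = ['x', 'y', 'z', 'w'] if 'w' in cubes else ['x', 'y', 'z']
--
--     def walk(i, prefix):
--         if i == len(axes):
--             yield tuple(prefix)
--         else:
--             bounds = cubes[axes[i]]
--             for v in range(bounds[0] - 1, bounds[1] + 2):
--                 yield from walk(i + 1, prefix + [v])
--
--     yield from walk(0, [])
-- ===== Notes on version B (the rewrite author's own statement) =====
-- stated objective: idiomatic
-- what changed: B decides the dimensionality once by building an axis list and the per-axis ranges up front, then emits coordinates via a single variable-arity cartesian product, instead of A's fixed nested loops with a per-cell is_four_d branch.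
import Mathlib
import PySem

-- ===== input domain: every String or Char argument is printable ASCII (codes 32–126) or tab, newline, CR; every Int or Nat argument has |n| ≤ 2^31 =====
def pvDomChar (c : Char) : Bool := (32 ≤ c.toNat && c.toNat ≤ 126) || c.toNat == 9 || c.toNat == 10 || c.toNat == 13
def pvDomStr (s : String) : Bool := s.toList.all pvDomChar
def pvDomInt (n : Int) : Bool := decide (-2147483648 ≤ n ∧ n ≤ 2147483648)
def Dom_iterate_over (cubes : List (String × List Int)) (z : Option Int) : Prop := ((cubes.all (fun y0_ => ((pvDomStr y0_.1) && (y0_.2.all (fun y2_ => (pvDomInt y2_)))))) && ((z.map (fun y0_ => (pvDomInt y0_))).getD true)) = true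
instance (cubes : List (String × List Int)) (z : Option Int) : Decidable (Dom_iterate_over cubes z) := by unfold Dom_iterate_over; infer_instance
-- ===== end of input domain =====

-- B chooses the axis list once and enumerates the box by one variable-arity recursive
-- enumerator, instead of A's fixed nested loops with a per-cell dimensionality branch
-- (idiomatic; same cost). Both generators are ported as the list of yielded tuples; the
-- unused parameter z is ignored by both (A's loop shadows it). Lookups stay lazy: where
-- the Python raises (missing key / short bounds list) the ports return [] at that point,
-- which is reached on exactly the same inputs in both.

-- ===== PORT A =====
-- cubes[k][0], cubes[k][1] (dict lookup = Python dict built from the pairs);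
-- none = KeyError / IndexError, i.e. the Python raises at this point
def pvBoundsA (cubes : List (String × List Int)) (k : String) : Option (Int × Int) :=
  match PySem.Dict.get? (PySem.Dict.ofList cubes) k with
  | some l =>
    match PySem.List.pyGet? l 0, PySem.List.pyGet? l 1 with
    | some lo, some hi => some (lo, hi)
    | _, _ => none
  | none => none

def is_four_d (cubes : List (String × List Int)) : Bool :=
  (PySem.Dict.get? (PySem.Dict.ofList cubes) "w").isSome

def iterate_over (cubes : List (String × List Int)) (z : Option Int) : List (List Int) :=
  match pvBoundsA cubes "x" with
  | none => []                 -- Python raises here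
  | some (x0, x1) =>
    (PySem.List.pyRange (x0 - 1) (x1 + 2) 1).flatMap fun x =>
      match pvBoundsA cubes "y" with
      | none => []             -- Python raises here
      | some (y0, y1) =>
        (PySem.List.pyRange (y0 - 1) (y1 + 2) 1).flatMap fun y =>
          match pvBoundsA cubes "z" with
          | none => []         -- Python raises here
          | some (z0, z1) =>
            (PySem.List.pyRange (z0 - 1) (z1 + 2) 1).flatMap fun zz =>
              if is_four_d cubes then
                match pvBoundsA cubes "w" with
                | none => []   -- Python raises here
                | some (w0, w1) =>
                  (PySem.List.pyRange (w0 - 1) (w1 + 2) 1).map fun w => [x, y, zz, w]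
              else [[x, y, zz]]

-- ===== PORT B =====
-- bounds = cubes[axes[i]]; bounds[0], bounds[1]
def pvBoundsB (cubes : List (String × List Int)) (a : String) : Option (Int × Int) :=
  match PySem.Dict.get? (PySem.Dict.ofList cubes) a with
  | some bounds =>
    match PySem.List.pyGet? bounds 0, PySem.List.pyGet? bounds 1 with
    | some b0, some b1 => some (b0, b1)
    | _, _ => none
  | none => none

-- walk(i, pref): pick one value from each remaining axis range, left to right
def pvWalk (cubes : List (String × List Int)) : List String → List Int → List (List Int)
  | [], pref => [pref]
  | a :: rest, pref =>
    match pvBoundsB cubes a with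
    | none => []               -- Python raises here
    | some (b0, b1) =>
      (PySem.List.pyRange (b0 - 1) (b1 + 2) 1).flatMap fun v =>
        pvWalk cubes rest (pref ++ [v])

def iterate_over_alt (cubes : List (String × List Int)) (z : Option Int) : List (List Int) :=
  let axes : List String :=
    if (PySem.Dict.get? (PySem.Dict.ofList cubes) "w").isSome
    then ["x", "y", "z", "w"] else ["x", "y", "z"]
  pvWalk cubes axes []

-- ===== PRECONDITION & SPEC =====
-- Pre_ is exactly where Python A returns: it raises (KeyError/IndexError) on a missing or
-- too-short axis entry, but only when that axis is actually reached, i.e. when every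
-- earlier expanded range is non-empty (the generator looks axes up lazily).
def pvAxOk (cubes : List (String × List Int)) (k : String) : Bool :=
  match PySem.Dict.get? (PySem.Dict.ofList cubes) k with
  | some l => decide (2 ≤ l.length)
  | none => false

-- the expanded range range(l[0]-1, l[1]+2) of axis k is empty
def pvAxEmpty (cubes : List (String × List Int)) (k : String) : Bool :=
  match PySem.Dict.get? (PySem.Dict.ofList cubes) k with
  | some (lo :: hi :: _) => decide (hi + 2 ≤ lo - 1)
  | _ => false

def Pre_iterate_over (cubes : List (String × List Int)) (z : Option Int) : Prop :=
  pvAxOk cubes "x" = true ∧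
  (pvAxEmpty cubes "x" = true ∨
    (pvAxOk cubes "y" = true ∧
      (pvAxEmpty cubes "y" = true ∨
        (pvAxOk cubes "z" = true ∧
          (pvAxEmpty cubes "z" = true ∨
            ((PySem.Dict.get? (PySem.Dict.ofList cubes) "w").isSome = true →
              pvAxOk cubes "w" = true))))))
instance (cubes : List (String × List Int)) (z : Option Int) : Decidable (Pre_iterate_over cubes z) := by
  unfold Pre_iterate_over; infer_instance

def pvWitness_iterate_over : (List (String × List Int)) × Option Int :=
  ([("x", [0, 1]), ("y", [-1, 0]), ("z", [2, 2])], none)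

def Spec_iterate_over (cubes : List (String × List Int)) (z : Option Int) (out : List (List Int)) : Prop := out = iterate_over_alt cubes z
instance (cubes : List (String × List Int)) (z : Option Int) (out : List (List Int)) : Decidable (Spec_iterate_over cubes z out) := by unfold Spec_iterate_over; infer_instance

-- ===== CLAIM (what is proved, stated in full; the proofs are below) =====
def Claim_equal_iterate_over : Prop := ∀ (cubes : List (String × List Int)) (z : Option Int), Dom_iterate_over cubes z → Pre_iterate_over cubes z → Spec_iterate_over cubes z (iterate_over cubes z)

-- ===== LEMMAS AND PROOFS =====
theorem pvBoundsB_eq_A (cubes : List (String × List Int)) (a : String) :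
    pvBoundsB cubes a = pvBoundsA cubes a := rfl

theorem pvFlatMap_singleton_eq_map {α β : Type} (f : α → β) (l : List α) :
    l.flatMap (fun a => [f a]) = l.map f := by
  induction l with
  | nil => rfl
  | cons x xs ih => simp [List.flatMap_cons, ih]

-- ===== VERDICT (by name: the statement is the Claim_ definition above) =====
-- the two lazy enumerations agree on every input, so Pre_ is not needed by the proof
theorem iterate_over_spec : Claim_equal_iterate_over := by
  intro cubes z _ _
  show iterate_over cubes z = iterate_over_alt cubes z
  unfold iterate_over iterate_over_alt
  by_cases h4 : (PySem.Dict.get? (PySem.Dict.ofList cubes) "w").isSome = true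
  all_goals simp only [h4, if_true, if_false, Bool.false_eq_true]
  all_goals cases hbx : pvBoundsA cubes "x" with
  | none => simp [pvWalk, pvBoundsB_eq_A, hbx]
  | some bx =>
    obtain ⟨x0, x1⟩ := bx
    simp only [pvWalk, pvBoundsB_eq_A, hbx]
    congr 1; funext x
    cases hby : pvBoundsA cubes "y" with
    | none => simp [pvWalk, pvBoundsB_eq_A, hby]
    | some by_ =>
      obtain ⟨y0, y1⟩ := by_
      simp only [pvWalk, pvBoundsB_eq_A, hby]
      congr 1; funext y
      cases hbz : pvBoundsA cubes "z" with
      | none => simp [pvWalk, pvBoundsB_eq_A, hbz]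
      | some bz =>
        obtain ⟨z0, z1⟩ := bz
        simp only [pvWalk, pvBoundsB_eq_A, hbz]
        congr 1; funext zz
        first
        | -- 4D case: A branches to the w loop, B walks the remaining axis "w"
          (simp only [is_four_d, h4, if_true]
           cases hbw : pvBoundsA cubes "w" with
           | none => simp [pvWalk, pvBoundsB_eq_A, hbw]
           | some bw =>
             obtain ⟨w0, w1⟩ := bw
             simp only [pvWalk, pvBoundsB_eq_A, hbw]
             rw [← pvFlatMap_singleton_eq_map]
             rfl)
        | -- 3D case: A yields the triple, B's walk has no axes left
          (simp only [is_four_d, h4, Bool.false_eq_true, if_false, pvWalk]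
           rfl)
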